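-- pv_equiv track=rewrite | github.com/leehwarang/Algorithm | level1/1-11.py | solution
-- ===== SOURCE A (Python) =====
-- def solution(s):
--     answer = ''
--     upper_s = s.upper()
--     real_answer = ''
--
--     for i, n in zip(s, upper_s):
--         if i == n:
--             answer += i
--             s = s.replace(i, "")
--     s = sorted(s, reverse=True)
--     answer = sorted(answer, reverse=True)
--
--     for i in s:
--         real_answer += i
--     for i in answer:
--         real_answer += i
--
--     return real_answer
-- ===== SOURCE B (Python) =====
-- def solution(s):
--     return ''.join(sorted(s, key=lambda c: (c == c.upper(), -ord(c))))
-- ===== Notes on version B (the rewrite author's own statement) =====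
-- stated objective: simpler
-- what changed: B replaces A's loop that partitions characters via repeated str.replace plus two separate descending sorts and two concatenation loops by a single sorted() call with the composite key (c == c.upper(), -ord(c)).
import Mathlib
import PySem

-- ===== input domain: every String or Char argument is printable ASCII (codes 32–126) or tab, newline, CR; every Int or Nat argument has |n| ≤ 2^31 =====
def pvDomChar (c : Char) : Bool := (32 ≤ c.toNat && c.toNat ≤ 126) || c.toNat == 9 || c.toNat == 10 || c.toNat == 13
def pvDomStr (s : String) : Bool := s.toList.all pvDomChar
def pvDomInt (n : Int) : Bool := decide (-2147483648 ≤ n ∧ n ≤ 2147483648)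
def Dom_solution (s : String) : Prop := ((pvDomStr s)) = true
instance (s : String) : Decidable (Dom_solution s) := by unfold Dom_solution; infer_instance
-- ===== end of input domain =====

-- B replaces A's partition-then-two-sorts by one keyed sort (group flag, -ord) for simplicity; same return value.

-- ===== PORT A =====
def solution (s : String) : String :=
  -- answer = ''; upper_s = s.upper(); real_answer = ''
  let upper_s := PySem.Chars.upper s.toList
  -- for i, n in zip(s, upper_s): if i == n: answer += i; s = s.replace(i, "")
  let st := (s.toList.zip upper_s).foldl
      (fun (st : List Char × List Char) (p : Char × Char) =>
        if p.1 == p.2 then (st.1 ++ [p.1], PySem.Chars.replace st.2 [p.1] []) else st)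
      (([] : List Char), s.toList)
  -- s = sorted(s, reverse=True); answer = sorted(answer, reverse=True)
  let s2 := PySem.List.sorted st.2 (fun x => x) true
  let answer2 := PySem.List.sorted st.1 (fun x => x) true
  -- for i in s: real_answer += i ; for i in answer: real_answer += i
  let real1 := s2.foldl (fun acc c => acc ++ [c]) ([] : List Char)
  let real2 := answer2.foldl (fun acc c => acc ++ [c]) real1
  String.ofList real2

-- ===== PORT B =====
def solution_alt (s : String) : String :=
  -- ''.join(sorted(s, key=lambda c: (c == c.upper(), -ord(c))))
  String.ofList (PySem.List.sorted2 s.toList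
    (fun c => c == PySem.Chars.upperChar c)
    (fun c => -(c.toNat : Int)) false)

-- ===== PRECONDITION & SPEC =====
def Spec_solution (s : String) (out : String) : Prop := out = solution_alt s
instance (s : String) (out : String) : Decidable (Spec_solution s out) := by unfold Spec_solution; infer_instance

-- ===== CLAIM (what is proved, stated in full; the proofs are below) =====
def Claim_equal_solution : Prop := ∀ (s : String), Dom_solution s → Spec_solution s (solution s)

-- ===== LEMMAS AND PROOFS =====

-- the predicate 'c == c.upper()' and the scalar encoding of B's tuple key
def pvUpEq (c : Char) : Bool := c == PySem.Chars.upperChar c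
def pvKey (c : Char) : Int := (if pvUpEq c then 2097152 else 0) - (c.toNat : Int)

theorem pvChar_toNat_lt (c : Char) : c.toNat < 2097152 := by
  rcases c.valid with h | ⟨h1, h2⟩ <;> · show c.val.toNat < 2097152; omega

-- s.replace(i, "") for a one-character i removes every occurrence of that character
theorem pvReplace_go_single (c : Char) : ∀ (fuel : Nat) (l acc : List Char), l.length ≤ fuel →
    PySem.Chars.replace.go [c] [] fuel l acc = acc.reverse ++ l.filter (fun x => x != c) := by
  intro fuel
  induction fuel with
  | zero =>
    intro l acc h
    have : l = [] := List.eq_nil_of_length_eq_zero (Nat.le_zero.mp h)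
    subst this; simp [PySem.Chars.replace.go]
  | succ n ih =>
    intro l acc h
    match l with
    | [] => simp [PySem.Chars.replace.go]
    | c' :: t =>
      by_cases hc : c' = c
      · subst hc
        have hpre : List.isPrefixOf [c'] (c' :: t) = true := by simp [List.isPrefixOf]
        rw [PySem.Chars.replace.go]
        simp only [hpre, if_true]
        show PySem.Chars.replace.go [c'] [] n t acc = _
        rw [ih t acc (by simpa using h)]
        simp
      · have hpre : List.isPrefixOf [c] (c' :: t) = false := by
          simp [List.isPrefixOf]; exact fun h' => hc h'.symm
        rw [PySem.Chars.replace.go]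
        simp only [hpre]
        rw [ih t (c' :: acc) (by simpa using h)]
        simp [hc]

theorem pvReplace_single (cs : List Char) (c : Char) :
    PySem.Chars.replace cs [c] [] = cs.filter (fun x => x != c) := by
  rw [PySem.Chars.replace]
  simp only [List.isEmpty_cons, if_false, Bool.false_eq_true]
  rw [pvReplace_go_single c cs.length cs [] (le_refl _)]
  simp

-- the loop of A: answer collects the upper-equal characters, s loses them
theorem pvLoop (l : List Char) : ∀ (ans cur : List Char),
    ((l.zip (PySem.Chars.upper l)).foldl
      (fun (st : List Char × List Char) (p : Char × Char) =>
        if p.1 == p.2 then (st.1 ++ [p.1], PySem.Chars.replace st.2 [p.1] []) else st)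
      (ans, cur))
    = (ans ++ l.filter pvUpEq, cur.filter (fun x => !(pvUpEq x && l.contains x))) := by
  induction l with
  | nil => intro ans cur; simp
  | cons c t ih =>
    intro ans cur
    simp only [PySem.Chars.upper, List.map_cons, List.zip_cons_cons, List.foldl_cons]
    by_cases hc : pvUpEq c
    · have hc' : (c == PySem.Chars.upperChar c) = true := hc
      simp only [hc', if_true]
      rw [pvReplace_single]
      have ih' := ih (ans ++ [c]) (cur.filter (fun x => x != c))
      simp only [PySem.Chars.upper] at ih'
      rw [ih']
      rw [List.filter_filter, Prod.mk.injEq]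
      refine ⟨by simp [hc], ?_⟩
      apply List.filter_congr
      intro x _
      by_cases hx : x = c
      · subst hx; simp [hc]
      · simp [hx]
    · have hc' : (c == PySem.Chars.upperChar c) = false := by
        simpa [pvUpEq] using hc
      have hf : pvUpEq c = false := by simpa [pvUpEq] using hc
      simp only [hc', if_false, Bool.false_eq_true]
      have ih' := ih ans cur
      simp only [PySem.Chars.upper] at ih'
      rw [ih', Prod.mk.injEq]
      refine ⟨by rw [List.filter_cons_of_neg hc], ?_⟩
      apply List.filter_congr
      intro x _
      by_cases hx : x = c
      · subst hx; simp [hf]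
      · simp [hx]

-- sorted2 with the tuple key equals sorted with the scalar key pvKey
theorem pvSorted2_eq_sorted (l : List Char) :
    PySem.List.sorted2 l (fun c => c == PySem.Chars.upperChar c) (fun c => -(c.toNat : Int)) false
    = PySem.List.sorted l pvKey false := by
  have hfun : (fun (a b : Char) =>
      (decide ((a == PySem.Chars.upperChar a) < (b == PySem.Chars.upperChar b)) ||
        (!decide ((b == PySem.Chars.upperChar b) < (a == PySem.Chars.upperChar a)) &&
          decide (-(a.toNat : Int) < -(b.toNat : Int)))))
      = fun a b => decide (pvKey a < pvKey b) := by
    funext a b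
    have ha := pvChar_toNat_lt a
    have hb := pvChar_toNat_lt b
    have h1 := pvUpEq a
    by_cases h1 : (a == PySem.Chars.upperChar a) = true <;>
      by_cases h2 : (b == PySem.Chars.upperChar b) = true <;>
      simp [pvKey, pvUpEq, h1, h2, Bool.lt_iff] <;> omega
  unfold PySem.List.sorted2 PySem.List.sorted
  simp only [Bool.false_eq_true, if_false]
  rw [hfun]

theorem pvKey_inj : Function.Injective pvKey := by
  intro a b h
  have ha := pvChar_toNat_lt a
  have hb := pvChar_toNat_lt b
  have htoNat : a.toNat = b.toNat := by
    by_cases h1 : pvUpEq a <;> by_cases h2 : pvUpEq b <;> simp [pvKey, h1, h2] at h <;> omega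
  exact Char.ext (by
    have : a.val.toNat = b.val.toNat := htoNat
    exact UInt32.toNat_inj.mp this)

-- the target shape: descending lowercase-changing group, then descending upper-equal group
theorem pvSorted_key_eq (l : List Char) :
    PySem.List.sorted l pvKey false
    = PySem.List.sorted (l.filter (fun x => !(pvUpEq x))) (fun x => x) true
      ++ PySem.List.sorted (l.filter pvUpEq) (fun x => x) true := by
  set G0 := l.filter (fun x => !(pvUpEq x)) with hG0
  set G1 := l.filter pvUpEq with hG1
  set T := PySem.List.sorted G0 (fun x => x) true ++ PySem.List.sorted G1 (fun x => x) true with hT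
  have hperm : l.Perm T := by
    have h1 : (PySem.List.sorted G0 (fun x => x) true).Perm G0 := PySem.List.sorted_perm _ _ _
    have h2 : (PySem.List.sorted G1 (fun x => x) true).Perm G1 := PySem.List.sorted_perm _ _ _
    have h3 : (G0 ++ G1).Perm l := by
      have := List.filter_append_perm (fun x => !(pvUpEq x)) l
      refine List.Perm.trans ?_ this
      apply List.Perm.append (List.Perm.refl _)
      rw [hG1]
      apply List.Perm.of_eq
      congr 1
      funext x
      simp
    exact ((h1.append h2).trans h3).symm
  have hmem0 : ∀ x ∈ PySem.List.sorted G0 (fun x => x) true, pvUpEq x = false := by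
    intro x hx
    have := (PySem.List.mem_sorted _ _ _ _).mp hx
    rw [hG0] at this
    simpa using (List.mem_filter.mp this).2
  have hmem1 : ∀ x ∈ PySem.List.sorted G1 (fun x => x) true, pvUpEq x = true := by
    intro x hx
    have := (PySem.List.mem_sorted _ _ _ _).mp hx
    rw [hG1] at this
    exact (List.mem_filter.mp this).2
  have hkey_le : ∀ (a b : Char), a.toNat ≤ b.toNat → pvUpEq a = pvUpEq b → pvKey b ≤ pvKey a := by
    intro a b hab he
    simp [pvKey, he]
    split <;> omega
  have hpw : T.Pairwise (fun a b => pvKey a ≤ pvKey b) := by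
    rw [hT, List.pairwise_append]
    refine ⟨?_, ?_, ?_⟩
    · have := PySem.List.sorted_pairwise_rev G0 (fun x => x)
      refine List.Pairwise.imp_of_mem ?_ this
      intro a b hma hmb hle
      exact hkey_le b a (by
        have : b.val ≤ a.val := hle
        exact UInt32.le_iff_toNat_le.mp this) (by rw [hmem0 b hmb, hmem0 a hma])
    · have := PySem.List.sorted_pairwise_rev G1 (fun x => x)
      refine List.Pairwise.imp_of_mem ?_ this
      intro a b hma hmb hle
      exact hkey_le b a (by
        have : b.val ≤ a.val := hle
        exact UInt32.le_iff_toNat_le.mp this) (by rw [hmem1 b hmb, hmem1 a hma])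
    · intro a hma b hmb
      have h0 := hmem0 a hma
      have h1 := hmem1 b hmb
      have hb := pvChar_toNat_lt b
      simp [pvKey, h0, h1]
      omega
  calc PySem.List.sorted l pvKey false
      = PySem.List.sorted T pvKey false :=
        PySem.List.sorted_eq_sorted_of_perm l T pvKey pvKey_inj hperm
    _ = T := PySem.List.sorted_eq_self_of_pairwise T pvKey hpw

-- ===== VERDICT (by name: the statement is the Claim_ definition above) =====
theorem solution_spec : Claim_equal_solution := by
  intro s _
  show solution s = solution_alt s
  rw [solution, solution_alt]
  rw [pvLoop s.toList [] s.toList]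
  simp only [List.nil_append]
  rw [PySem.List.foldl_append_singleton_eq_self, PySem.List.foldl_append_singleton_eq_self,
    List.nil_append]
  rw [pvSorted2_eq_sorted, pvSorted_key_eq]
  congr 1
  congr 2
  apply List.filter_congr
  intro x hx
  simp
  exact fun h => absurd hx h
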